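-- pv_equiv track=rewrite | github.com/linzhiqiu/open_active | utils.py | get_target_unmapping_dict
-- ===== SOURCE A (Python) =====
-- def get_target_unmapping_dict(classes, discovered_classes):
--     """Return a dictionary that map 0-len(discovered_classes) to true discovered_classes indices.
--         Args:
--             classes: The list of all classes
--             discovered_classes: The set of all discovered classes
--         Returns:
--             unmapping (dict int -> int) : It maps softmax indices to true class indices.
--                                           It is the inverse function of get_target_transform_func() (for discovered_classes).
--     """
--     discovered_classes = sorted(list(discovered_classes))
--     mapping = {idx : -1 if idx not in discovered_classes else
--                      discovered_classes.index(idx)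
--                for idx in classes}
--     unmapping = {mapping[true_index] : true_index for true_index in mapping.keys()}
--     if -1 in unmapping.keys():
--         del unmapping[-1]
--     return unmapping
-- ===== SOURCE B (Python) =====
-- def get_target_unmapping_dict(classes, discovered_classes):
--     """Return a dictionary that map 0-len(discovered_classes) to true discovered_classes indices.
--
--     Rank-by-counting: no sorting, no index scan, no forward mapping, no
--     inversion, no -1 sentinel.  The softmax index of a discovered class c is,
--     by definition of a sorted list, exactly the number of discovered elements
--     strictly smaller than c; so each class is mapped to its rank directly.
--     """
--     discovered = list(discovered_classes)
--     unmapping = {}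
--     for c in classes:
--         if c in discovered:
--             unmapping[sum(1 for d in discovered if d < c)] = c
--     return unmapping
-- ===== Notes on version B (the rewrite author's own statement) =====
-- stated objective: alternative
-- what changed: B never sorts and never inverts: instead of A's pipeline (sort discovered, build a forward class->index mapping via list.index with a -1 sentinel, invert the dict, delete the sentinel), B computes each discovered class's softmax index directly as the count of discovered elements strictly smaller than it (the rank), writing unmapping[rank] = c in one pass over classes.
import Mathlib
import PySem

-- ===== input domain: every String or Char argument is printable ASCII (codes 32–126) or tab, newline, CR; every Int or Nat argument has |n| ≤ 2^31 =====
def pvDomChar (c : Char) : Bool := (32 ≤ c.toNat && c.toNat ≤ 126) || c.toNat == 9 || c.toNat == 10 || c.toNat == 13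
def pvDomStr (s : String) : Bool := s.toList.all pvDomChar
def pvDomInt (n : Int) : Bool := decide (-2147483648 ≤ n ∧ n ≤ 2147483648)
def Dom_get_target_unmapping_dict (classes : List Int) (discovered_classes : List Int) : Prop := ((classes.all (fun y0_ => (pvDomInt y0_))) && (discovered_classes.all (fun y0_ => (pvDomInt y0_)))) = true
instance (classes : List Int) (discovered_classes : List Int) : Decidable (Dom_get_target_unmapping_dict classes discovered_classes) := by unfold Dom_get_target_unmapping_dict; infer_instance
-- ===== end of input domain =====

-- B computes each discovered class's softmax index directly as the count of discovered elements
-- strictly smaller than it (its rank), in one pass over classes — no sort, no forward mapping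
-- with its per-class list.index scan, no inversion step, no -1 sentinel deletion (objective: alternative).


-- ===== PORT A =====
def get_target_unmapping_dict (classes : List Int) (discovered_classes : List Int) : List (Int × Int) :=
  -- discovered_classes = sorted(list(discovered_classes))
  let sd := PySem.List.sorted discovered_classes (fun x => x) false
  -- mapping = {idx : -1 if idx not in discovered_classes else discovered_classes.index(idx) for idx in classes}
  let mapping : PySem.Dict Int Int :=
    classes.foldl (fun m idx =>
      m.insert idx (if sd.contains idx = false then -1
                    -- .index is guarded by the membership test, so getD 0 is exact here
                    else (((PySem.List.index? sd idx).getD 0 : Nat) : Int))) PySem.Dict.empty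
  -- unmapping = {mapping[true_index] : true_index for true_index in mapping.keys()}
  let unmapping : PySem.Dict Int Int :=
    mapping.keys.foldl (fun u true_index =>
      -- true_index is a key of mapping, so getD 0 is exact here
      u.insert (mapping.getD true_index 0) true_index) PySem.Dict.empty
  -- if -1 in unmapping.keys(): del unmapping[-1]
  let unmapping := if unmapping.contains (-1) = true then unmapping.erase (-1) else unmapping
  unmapping.items

-- ===== PORT B =====
def get_target_unmapping_dict_alt (classes : List Int) (discovered_classes : List Int) : List (Int × Int) :=
  -- discovered = list(discovered_classes)
  let discovered := discovered_classes
  -- unmapping = {}; for c in classes: if c in discovered: unmapping[sum(1 for d in discovered if d < c)] = c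
  let unmapping : PySem.Dict Int Int :=
    classes.foldl (fun u c =>
      if discovered.contains c = true then
        u.insert ((discovered.countP (fun d => decide (d < c)) : Nat) : Int) c
      else u) PySem.Dict.empty
  unmapping.items

-- ===== PRECONDITION & SPEC =====
def Spec_get_target_unmapping_dict (classes : List Int) (discovered_classes : List Int) (out : List (Int × Int)) : Prop := out = get_target_unmapping_dict_alt classes discovered_classes
instance (classes : List Int) (discovered_classes : List Int) (out : List (Int × Int)) : Decidable (Spec_get_target_unmapping_dict classes discovered_classes out) := by unfold Spec_get_target_unmapping_dict; infer_instance

-- ===== CLAIM (what is proved, stated in full; the proofs are below) =====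
def Claim_equal_get_target_unmapping_dict : Prop := ∀ (classes : List Int) (discovered_classes : List Int), Dom_get_target_unmapping_dict classes discovered_classes → Spec_get_target_unmapping_dict classes discovered_classes (get_target_unmapping_dict classes discovered_classes)

-- ===== LEMMAS AND PROOFS =====

-- index of t in sd, as an Int (meaningful when t ∈ sd)
def kidx (sd : List Int) (t : Int) : Int := (((PySem.List.index? sd t).getD 0 : Nat) : Int)

-- the canonical step both unmapping loops reduce to
def stepC (sd : List Int) (d : PySem.Dict Int Int) (t : Int) : PySem.Dict Int Int :=
  if sd.contains t = true then d.insert (kidx sd t) t else d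

-- the dict state after the canonical loop has processed the prefix acc
def dictOf (sd : List Int) (acc : List Int) : PySem.Dict Int Int :=
  PySem.Dict.mk (((PySem.Set.ofList acc).filter (fun t => sd.contains t)).map (fun t => (kidx sd t, t)))

theorem kidx_inj (sd : List Int) (s t : Int) (hs : s ∈ sd) (ht : t ∈ sd)
    (h : kidx sd s = kidx sd t) : s = t := by
  obtain ⟨ns, hns⟩ := Option.isSome_iff_exists.mp ((PySem.List.index?_isSome_iff sd s).mpr hs)
  obtain ⟨nt, hnt⟩ := Option.isSome_iff_exists.mp ((PySem.List.index?_isSome_iff sd t).mpr ht)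
  simp only [kidx, hns, hnt, Option.getD_some, Nat.cast_inj] at h
  subst h
  obtain ⟨hk, hsv, -⟩ := PySem.List.getElem_of_index?_eq_some hns
  obtain ⟨hk', htv, -⟩ := PySem.List.getElem_of_index?_eq_some hnt
  rw [← hsv, ← htv]

theorem erase_of_not_contains (d : PySem.Dict Int Int) (k : Int)
    (h : d.contains k = false) : d.erase k = d := by
  apply PySem.Dict.ext
  simp only [PySem.Dict.erase, PySem.Dict.contains, List.any_eq_false] at *
  exact List.filter_eq_self.mpr (by intro p hp; simpa using h p hp)

theorem erase_insert_of_ne (d : PySem.Dict Int Int) (k' k : Int) (v : Int) (h : k' ≠ k) :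
    (d.insert k' v).erase k = (d.erase k).insert k' v := by
  by_cases hc : d.contains k' = true
  · have hc' : (d.erase k).contains k' = true := by
      simp only [PySem.Dict.contains, PySem.Dict.erase, List.any_eq_true] at *
      obtain ⟨p, hp, hpk⟩ := hc
      exact ⟨p, List.mem_filter.mpr ⟨hp, by simp_all⟩, hpk⟩
    apply PySem.Dict.ext
    rw [PySem.Dict.items_insert_of_contains _ _ hc']
    simp only [PySem.Dict.erase]
    rw [PySem.Dict.items_insert_of_contains _ _ hc]
    rw [List.filter_map]
    congr 1
    apply List.filter_congr
    intro p hp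
    simp only [Function.comp]
    by_cases hpk : p.1 = k'
    · simp [hpk]
    · simp [hpk]
  · replace hc : d.contains k' = false := by simpa using hc
    have hc' : (d.erase k).contains k' = false := by
      simp only [PySem.Dict.contains, PySem.Dict.erase, List.any_eq_false] at *
      intro p hp; exact hc p (List.mem_filter.mp hp).1
    apply PySem.Dict.ext
    rw [PySem.Dict.items_insert_of_not_contains _ _ hc']
    simp only [PySem.Dict.erase]
    rw [PySem.Dict.items_insert_of_not_contains _ _ hc]
    simp [List.filter_append, h]

theorem erase_insert_self (d : PySem.Dict Int Int) (k v : Int) :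
    (d.insert k v).erase k = d.erase k := by
  by_cases hc : d.contains k = true
  · apply PySem.Dict.ext
    simp only [PySem.Dict.erase]
    rw [PySem.Dict.items_insert_of_contains _ _ hc]
    rw [List.filter_map]
    have h1 : List.filter ((fun p => !p.1 == k) ∘ fun p => if (p.1 == k) = true then (k, v) else p) d.items
        = List.filter (fun p => !p.1 == k) d.items := by
      apply List.filter_congr
      intro p hp
      by_cases hpk : p.1 = k
      · simp [hpk]
      · simp [hpk]
    rw [h1]
    have h2 : ∀ p ∈ List.filter (fun p => !p.1 == k) d.items,
        (if (p.1 == k) = true then (k, v) else p) = p := by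
      intro p hp
      have := (List.mem_filter.mp hp).2
      simp only [Bool.not_eq_true'] at this
      simp [this]
    rw [List.map_congr_left h2]
    simp
  · replace hc : d.contains k = false := by simpa using hc
    apply PySem.Dict.ext
    simp only [PySem.Dict.erase]
    rw [PySem.Dict.items_insert_of_not_contains _ _ hc]
    simp [List.filter_append]

theorem mapFold_get? (g : Int → Int) (l : List Int) (d : PySem.Dict Int Int) (v : Int) :
    (l.foldl (fun m idx => m.insert idx (g idx)) d).get? v
    = if v ∈ l then some (g v) else d.get? v := by
  induction l generalizing d with
  | nil => simp
  | cons a l ih =>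
      rw [List.foldl_cons, ih]
      by_cases hv : v ∈ l
      · simp [hv]
      · by_cases hva : v = a
        · subst hva
          simp [hv, PySem.Dict.get?_insert_self]
        · simp [hv, hva, PySem.Dict.get?_insert_of_ne _ _ hva]

theorem dictOf_step (sd acc : List Int) (t : Int) :
    stepC sd (dictOf sd acc) t = dictOf sd (acc ++ [t]) := by
  by_cases hct : sd.contains t = true
  · have htm : t ∈ sd := by simpa using hct
    by_cases hacc : t ∈ PySem.Set.ofList acc
    · have hpair : (kidx sd t, t) ∈ (dictOf sd acc).items :=
        List.mem_map.mpr ⟨t, List.mem_filter.mpr ⟨hacc, by simpa using hct⟩, rfl⟩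
      have hcontains : (dictOf sd acc).contains (kidx sd t) = true := by
        simp only [PySem.Dict.contains, List.any_eq_true]
        exact ⟨_, hpair, by simp⟩
      have heq : stepC sd (dictOf sd acc) t = dictOf sd acc := by
        apply PySem.Dict.ext
        simp only [stepC, hct, if_pos]
        rw [PySem.Dict.items_insert_of_contains _ _ hcontains]
        apply List.map_congr_left ?_ |>.trans (List.map_id _)
        intro p hp
        obtain ⟨s, hsf, rfl⟩ := List.mem_map.mp hp
        obtain ⟨hsm, hsc⟩ := List.mem_filter.mp hsf
        by_cases hk : kidx sd s = kidx sd t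
        · have : s = t := kidx_inj sd s t (by simpa using hsc) htm hk
          subst this
          simp
        · simp only [id]
          have : (kidx sd s == kidx sd t) = false := by simpa using hk
          simp [this]
      rw [heq]
      unfold dictOf
      rw [PySem.Set.ofList_append_singleton, PySem.Set.add_of_mem hacc]
    · have hnc : (dictOf sd acc).contains (kidx sd t) = false := by
        simp only [PySem.Dict.contains, List.any_eq_false]
        intro p hp
        obtain ⟨s, hsf, rfl⟩ := List.mem_map.mp hp
        obtain ⟨hsm, hsc⟩ := List.mem_filter.mp hsf
        simp only [Bool.not_eq_true, beq_eq_false_iff_ne, ne_eq]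
        intro hk
        exact hacc (by rwa [kidx_inj sd s t (by simpa using hsc) htm hk] at hsm)
      apply PySem.Dict.ext
      simp only [stepC, hct, if_pos]
      rw [PySem.Dict.items_insert_of_not_contains _ _ hnc]
      unfold dictOf
      rw [PySem.Set.ofList_append_singleton, PySem.Set.add_of_not_mem hacc]
      have : t ∈ sd := htm
      simp [List.filter_append, this]
  · have hcf : sd.contains t = false := by simpa using hct
    have heq : stepC sd (dictOf sd acc) t = dictOf sd acc := by
      unfold stepC
      rw [if_neg (by simpa using hcf)]
    rw [heq]
    unfold dictOf
    rw [PySem.Set.ofList_append_singleton, PySem.Set.add_eq_ite]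
    split
    · rfl
    · have : t ∉ sd := by simpa using hcf
      simp [List.filter_append, this]

theorem dictOf_fold (sd : List Int) (l acc : List Int) :
    l.foldl (stepC sd) (dictOf sd acc) = dictOf sd (acc ++ l) := by
  induction l generalizing acc with
  | nil => simp
  | cons a l ih =>
      simp only [List.foldl_cons, dictOf_step]
      rw [ih]
      simp

theorem rel_fold (sd : List Int) (val : Int → Int) (l : List Int)
    (hval : ∀ t ∈ l, val t = if sd.contains t = false then -1 else kidx sd t)
    (d : PySem.Dict Int Int) :
    (l.foldl (fun u t => u.insert (val t) t) d).erase (-1)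
    = l.foldl (stepC sd) (d.erase (-1)) := by
  induction l generalizing d with
  | nil => rfl
  | cons a l ih =>
      have ha := hval a (List.mem_cons_self)
      rw [List.foldl_cons, List.foldl_cons, ih (fun t ht => hval t (List.mem_cons_of_mem _ ht))]
      congr 1
      by_cases hca : sd.contains a = true
      · rw [ha]
        simp only [hca, Bool.true_eq_false, if_false]
        have hne : kidx sd a ≠ -1 := by
          have : (0:Int) ≤ kidx sd a := by simp [kidx]
          omega
        rw [erase_insert_of_ne _ _ _ _ hne]
        unfold stepC
        rw [if_pos hca]
      · have hcf : sd.contains a = false := by simpa using hca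
        rw [ha]
        simp only [hcf, if_pos]
        rw [erase_insert_self]
        unfold stepC
        rw [if_neg (by simpa using hcf)]

-- in a ≤-sorted list, the first-occurrence index of a member is the number of smaller elements
theorem index?_sorted_eq_countP (sd : List Int) (hs : sd.Pairwise (· ≤ ·)) (c : Int) (hc : c ∈ sd) :
    PySem.List.index? sd c = some (sd.countP (fun d => decide (d < c))) := by
  induction sd with
  | nil => cases hc
  | cons x xs ih =>
      rcases List.pairwise_cons.mp hs with ⟨hx, hxs⟩
      by_cases hcx : x = c
      · subst hcx
        rw [PySem.List.index?_cons_self]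
        have h0 : xs.countP (fun d => decide (d < x)) = 0 := by
          rw [List.countP_eq_zero]
          intro d hd
          have := hx d hd
          simp only [decide_eq_true_eq]
          omega
        simp [h0]
      · have hcxs : c ∈ xs := by
          rcases List.mem_cons.mp hc with h | h
          · exact absurd h.symm hcx
          · exact h
        rw [PySem.List.index?_cons_of_ne _ hcx, ih hxs hcxs]
        have hlt : x < c := lt_of_le_of_ne (hx c hcxs) hcx
        simp [decide_eq_true hlt]

-- ===== VERDICT (by name: the statement is the Claim_ definition above) =====
theorem get_target_unmapping_dict_spec : Claim_equal_get_target_unmapping_dict := by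
  intro classes discovered _
  unfold Spec_get_target_unmapping_dict
  simp only [get_target_unmapping_dict, get_target_unmapping_dict_alt]
  set sd := PySem.List.sorted discovered (fun x => x) false with hsd
  have hperm : sd.Perm discovered := PySem.List.sorted_perm discovered (fun x => x) false
  generalize hM : List.foldl (fun (m : PySem.Dict Int Int) idx =>
      m.insert idx (if sd.contains idx = false then -1
                    else (((PySem.List.index? sd idx).getD 0 : Nat) : Int)))
      PySem.Dict.empty classes = mapping
  -- A's keys are the ordered-dedup of classes
  have hkeys : mapping.keys = PySem.Set.ofList classes := by
    rw [← hM]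
    have h1 : (List.foldl (fun (m : PySem.Dict Int Int) idx =>
        m.insert idx (if sd.contains idx = false then -1
                      else (((PySem.List.index? sd idx).getD 0 : Nat) : Int)))
        PySem.Dict.empty classes).keys = PySem.Set.update PySem.Dict.empty.keys classes :=
      PySem.Dict.keys_foldl_insert classes
        (fun _ idx => if sd.contains idx = false then -1
                      else (((PySem.List.index? sd idx).getD 0 : Nat) : Int)) PySem.Dict.empty
    rw [h1, PySem.Dict.keys_empty, PySem.Set.update_nil_left]
  -- A's mapping looks up the guarded index
  have hgetD : ∀ t ∈ classes, mapping.getD t 0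
      = if sd.contains t = false then -1 else kidx sd t := by
    intro t ht
    rw [PySem.Dict.getD_eq_get?_getD, ← hM,
        mapFold_get? (fun idx => if sd.contains idx = false then -1
                      else (((PySem.List.index? sd idx).getD 0 : Nat) : Int)) classes,
        if_pos ht, Option.getD_some]
    rfl
  -- B's loop body IS the canonical step: the rank equals the first-occurrence index in sd
  have hstepB : (fun (u : PySem.Dict Int Int) (c : Int) =>
      if discovered.contains c = true then
        u.insert ((discovered.countP (fun d => decide (d < c)) : Nat) : Int) c
      else u) = stepC sd := by
    funext u c
    have hcont : discovered.contains c = sd.contains c := by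
      by_cases h : c ∈ discovered
      · simp [h, hperm.mem_iff.mpr h]
      · simp [h]
        exact fun hh => h (hperm.mem_iff.mp hh)
    unfold stepC
    rw [hcont]
    by_cases hc : sd.contains c = true
    · rw [if_pos hc, if_pos hc]
      have hcm : c ∈ sd := by simpa using hc
      have hcount : discovered.countP (fun d => decide (d < c))
          = sd.countP (fun d => decide (d < c)) := (hperm.countP_eq _).symm
      have hidx := index?_sorted_eq_countP sd
        (by simpa using PySem.List.sorted_pairwise discovered (fun x => x)) c hcm
      rw [hcount]
      unfold kidx
      rw [hidx]
      simp
    · rw [if_neg hc, if_neg hc]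
  -- A's conditional delete is an unconditional erase
  have hdel : ∀ (u : PySem.Dict Int Int),
      (if u.contains (-1) = true then u.erase (-1) else u) = u.erase (-1) := by
    intro u
    split
    · rfl
    · rename_i h
      rw [erase_of_not_contains u (-1) (by simpa using h)]
  rw [hdel, hkeys, hstepB]
  have hrel := rel_fold sd (fun t => mapping.getD t 0) (PySem.Set.ofList classes)
    (fun t ht => hgetD t ((PySem.Set.mem_ofList classes t).mp ht)) PySem.Dict.empty
  rw [hrel]
  rw [show (PySem.Dict.empty : PySem.Dict Int Int).erase (-1) = dictOf sd [] from rfl]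
  rw [show (PySem.Dict.empty : PySem.Dict Int Int) = dictOf sd [] from rfl]
  rw [dictOf_fold, dictOf_fold]
  simp only [List.nil_append]
  unfold dictOf
  rw [PySem.Set.ofList_ofList]
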